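-- pv_equiv track=rewrite | github.com/nickest14/Leetcode-python | python/easy/Solution_3606.py | validateCoupons
-- ===== SOURCE A (Python) =====
-- from typing import List
--
-- def validateCoupons(
--     code: List[str], businessLine: List[str], isActive: List[bool]
-- ) -> List[str]:
--     e_group: list[str] = []
--     g_group: list[str] = []
--     p_group: list[str] = []
--     r_group: list[str] = []
--     for i in range(len(code)):
--         if not isActive[i]:
--             continue
--         bl = businessLine[i]
--         if bl not in ("electronics", "grocery", "pharmacy", "restaurant"):
--             continue
--
--         if not code[i]:
--             continue
--
--         if not all(ch.isalnum() or ch == "_" for ch in code[i]):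
--             continue
--
--         if bl.startswith("e"):
--             e_group.append(code[i])
--         if bl.startswith("g"):
--             g_group.append(code[i])
--         if bl.startswith("p"):
--             p_group.append(code[i])
--         if bl.startswith("r"):
--             r_group.append(code[i])
--
--     return sorted(e_group) + sorted(g_group) + sorted(p_group) + sorted(r_group)
--
-- code = ["SAVE20", "", "PHARMA5", "SAVE@20"]
--
-- businessLine = ["restaurant", "grocery", "pharmacy", "restaurant"]
--
-- isActive = [True, True, True, True]
-- ===== SOURCE B (Python) =====
-- def validateCoupons(code, businessLine, isActive):
--     RANK = {"electronics": 0, "grocery": 1, "pharmacy": 2, "restaurant": 3}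
--     keyed = []
--     for i in range(len(code)):
--         if not isActive[i]:
--             continue
--         rank = RANK.get(businessLine[i])
--         if rank is None:
--             continue
--         c = code[i]
--         if not c or not all(ch.isalnum() or ch == "_" for ch in c):
--             continue
--         keyed.append((rank, c))
--     keyed.sort()
--     return [c for _, c in keyed]
-- ===== Notes on version B (the rewrite author's own statement) =====
-- stated objective: alternative
-- what changed: B drops A's four per-business group lists and four separate sorts: it collects each valid coupon once as a (rank, code) pair via a rank dictionary and performs a single composite-key sort, then strips the ranks.
import Mathlib
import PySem

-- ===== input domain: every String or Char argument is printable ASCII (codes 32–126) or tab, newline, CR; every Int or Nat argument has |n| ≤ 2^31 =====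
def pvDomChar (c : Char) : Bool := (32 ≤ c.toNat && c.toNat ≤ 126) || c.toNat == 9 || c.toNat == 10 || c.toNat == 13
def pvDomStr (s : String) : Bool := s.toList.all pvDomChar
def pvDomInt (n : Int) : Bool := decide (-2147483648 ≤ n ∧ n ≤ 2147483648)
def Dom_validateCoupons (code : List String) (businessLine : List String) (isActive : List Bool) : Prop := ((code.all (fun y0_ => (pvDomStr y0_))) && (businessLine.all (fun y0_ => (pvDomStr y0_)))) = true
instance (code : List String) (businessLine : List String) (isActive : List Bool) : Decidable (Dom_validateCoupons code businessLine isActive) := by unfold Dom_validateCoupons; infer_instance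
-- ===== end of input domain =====

-- B replaces A's four per-business group lists and four sorts by one list of (rank, code)
-- pairs sorted once by composite key (objective: alternative decomposition, similar cost).


-- ===== PORT A =====
-- the loop body of A, one index i (state = the four group lists)
def pvStepA (code businessLine : List String) (isActive : List Bool)
    (st : List String × List String × List String × List String) (i : Int) :
    List String × List String × List String × List String :=
  let (e, g, p, r) := st
  if !(PySem.List.pyGetD isActive i false) then (e, g, p, r)
  else
    let bl := PySem.List.pyGetD businessLine i ""
    if !(bl == "electronics" || bl == "grocery" || bl == "pharmacy" || bl == "restaurant") then
      (e, g, p, r)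
    else
      let c := PySem.List.pyGetD code i ""
      if c.toList.isEmpty then (e, g, p, r)
      else if !(c.toList.all (fun ch => PySem.Chars.isalnum ch || ch == '_')) then (e, g, p, r)
      else
        let e := if PySem.Str.startswith bl "e" then e ++ [c] else e
        let g := if PySem.Str.startswith bl "g" then g ++ [c] else g
        let p := if PySem.Str.startswith bl "p" then p ++ [c] else p
        let r := if PySem.Str.startswith bl "r" then r ++ [c] else r
        (e, g, p, r)

def validateCoupons (code : List String) (businessLine : List String) (isActive : List Bool) : List String :=
  PySem.List.sorted ((PySem.List.pyRange 0 code.length 1).foldl (pvStepA code businessLine isActive) ([], [], [], [])).1 (fun x => x) false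
    ++ PySem.List.sorted ((PySem.List.pyRange 0 code.length 1).foldl (pvStepA code businessLine isActive) ([], [], [], [])).2.1 (fun x => x) false
    ++ PySem.List.sorted ((PySem.List.pyRange 0 code.length 1).foldl (pvStepA code businessLine isActive) ([], [], [], [])).2.2.1 (fun x => x) false
    ++ PySem.List.sorted ((PySem.List.pyRange 0 code.length 1).foldl (pvStepA code businessLine isActive) ([], [], [], [])).2.2.2 (fun x => x) false

-- ===== PORT B =====
def pvRANK : PySem.Dict String Int :=
  PySem.Dict.ofList [("electronics", 0), ("grocery", 1), ("pharmacy", 2), ("restaurant", 3)]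

-- the loop body of B, one index i (state = the single keyed list)
def pvStepB (code businessLine : List String) (isActive : List Bool)
    (keyed : List (Int × String)) (i : Int) : List (Int × String) :=
  if !(PySem.List.pyGetD isActive i false) then keyed
  else
    match pvRANK.get? (PySem.List.pyGetD businessLine i "") with
    | none => keyed
    | some rank =>
      let c := PySem.List.pyGetD code i ""
      if c.toList.isEmpty || !(c.toList.all (fun ch => PySem.Chars.isalnum ch || ch == '_')) then keyed
      else keyed ++ [(rank, c)]

def validateCoupons_alt (code : List String) (businessLine : List String) (isActive : List Bool) : List String :=
  (PySem.List.sorted ((PySem.List.pyRange 0 code.length 1).foldl (pvStepB code businessLine isActive) []) (fun q => toLex q) false).map (fun q => q.2)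

-- ===== PRECONDITION & SPEC =====
-- Pre_ excludes exactly the inputs where A raises IndexError: an index i < len(code) with
-- isActive too short, or with isActive[i] true and businessLine too short.
def Pre_validateCoupons (code : List String) (businessLine : List String) (isActive : List Bool) : Prop :=
  code.length ≤ isActive.length ∧
    ∀ i < code.length, isActive.getD i false = true → i < businessLine.length
instance (code : List String) (businessLine : List String) (isActive : List Bool) : Decidable (Pre_validateCoupons code businessLine isActive) := by unfold Pre_validateCoupons; infer_instance

def pvWitness_validateCoupons : List String × List String × List Bool :=
  (["SAVE20", "", "PHARMA5", "SAVE@20"], ["restaurant", "grocery", "pharmacy", "restaurant"], [true, true, true, true])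

def Spec_validateCoupons (code : List String) (businessLine : List String) (isActive : List Bool) (out : List String) : Prop := out = validateCoupons_alt code businessLine isActive
instance (code : List String) (businessLine : List String) (isActive : List Bool) (out : List String) : Decidable (Spec_validateCoupons code businessLine isActive out) := by unfold Spec_validateCoupons; infer_instance

-- ===== CLAIM (what is proved, stated in full; the proofs are below) =====
def Claim_equal_validateCoupons : Prop := ∀ (code : List String) (businessLine : List String) (isActive : List Bool), Dom_validateCoupons code businessLine isActive → Pre_validateCoupons code businessLine isActive → Spec_validateCoupons code businessLine isActive (validateCoupons code businessLine isActive)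

-- ===== LEMMAS AND PROOFS =====

-- codes of the keyed list carrying rank j, in order
def pvProj (j : Int) (k : List (Int × String)) : List String :=
  (k.filter (fun q => q.1 == j)).map (fun q => q.2)

def pvRanked (k : List (Int × String)) : Prop :=
  ∀ q ∈ k, q.1 = 0 ∨ q.1 = 1 ∨ q.1 = 2 ∨ q.1 = 3

theorem pvProj_append_self (j : Int) (c : String) (k : List (Int × String)) :
    pvProj j (k ++ [(j, c)]) = pvProj j k ++ [c] := by
  simp [pvProj]

theorem pvProj_append_ne (j j' : Int) (c : String) (k : List (Int × String)) (h : j' ≠ j) :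
    pvProj j (k ++ [(j', c)]) = pvProj j k := by
  simp [pvProj, h]

theorem pvRanked_append (j : Int) (c : String) (k : List (Int × String)) (hr : pvRanked k)
    (hj : j = 0 ∨ j = 1 ∨ j = 2 ∨ j = 3) : pvRanked (k ++ [(j, c)]) := by
  intro q hq
  rcases List.mem_append.mp hq with h | h
  · exact hr q h
  · simp at h; subst h; exact hj

theorem pvRank_get (bl : String) :
    pvRANK.get? bl =
      if bl = "electronics" then some 0 else if bl = "grocery" then some 1
      else if bl = "pharmacy" then some 2 else if bl = "restaurant" then some 3 else none := by
  by_cases h1 : bl = "electronics"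
  · subst h1; decide
  by_cases h2 : bl = "grocery"
  · subst h2; decide
  by_cases h3 : bl = "pharmacy"
  · subst h3; decide
  by_cases h4 : bl = "restaurant"
  · subst h4; decide
  have hmk : pvRANK = PySem.Dict.mk [("electronics", 0), ("grocery", 1), ("pharmacy", 2), ("restaurant", 3)] := by decide
  rw [hmk]
  simp [pysem, PySem.Dict.get?_mk_cons, Ne.symm h1, Ne.symm h2, Ne.symm h3, Ne.symm h4, h1, h2, h3, h4]

-- one step preserves the projection relation
theorem pvStep_rel (code businessLine : List String) (isActive : List Bool) (i : Int)
    (st : List String × List String × List String × List String) (k : List (Int × String))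
    (h0 : pvProj 0 k = st.1) (h1 : pvProj 1 k = st.2.1) (h2 : pvProj 2 k = st.2.2.1)
    (h3 : pvProj 3 k = st.2.2.2) (hr : pvRanked k) :
    pvProj 0 (pvStepB code businessLine isActive k i) = (pvStepA code businessLine isActive st i).1 ∧
    pvProj 1 (pvStepB code businessLine isActive k i) = (pvStepA code businessLine isActive st i).2.1 ∧
    pvProj 2 (pvStepB code businessLine isActive k i) = (pvStepA code businessLine isActive st i).2.2.1 ∧
    pvProj 3 (pvStepB code businessLine isActive k i) = (pvStepA code businessLine isActive st i).2.2.2 ∧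
    pvRanked (pvStepB code businessLine isActive k i) := by
  obtain ⟨e, g, p, r⟩ := st
  simp only at h0 h1 h2 h3
  unfold pvStepA pvStepB
  rw [pvRank_get]
  by_cases ha : PySem.List.pyGetD isActive i false = true
  case neg =>
    simp only [Bool.not_eq_true] at ha
    simp [ha, h0, h1, h2, h3, hr]
  simp only [ha, Bool.not_true, Bool.false_eq_true, if_false]
  by_cases hb1 : PySem.List.pyGetD businessLine i "" = "electronics"
  · rw [hb1]
    by_cases hc : (PySem.List.pyGetD code i "").toList.isEmpty
    · simp [hc, h0, h1, h2, h3, hr]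
    by_cases hall : (PySem.List.pyGetD code i "").toList.all (fun ch => PySem.Chars.isalnum ch || ch == '_')
    · simp only [hc, hall, if_true, if_false, Bool.not_true, Bool.or_self,
        Bool.false_eq_true, if_true]
      simp [pvProj_append_self, pvProj_append_ne, h0, h1, h2, h3,
        pvRanked_append _ _ _ hr]
      exact ⟨by decide, by decide, by decide, by decide⟩
    · simp [hc, hall, h0, h1, h2, h3, hr]
  by_cases hb2 : PySem.List.pyGetD businessLine i "" = "grocery"
  · rw [hb2]
    by_cases hc : (PySem.List.pyGetD code i "").toList.isEmpty
    · simp [hc, h0, h1, h2, h3, hr]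
    by_cases hall : (PySem.List.pyGetD code i "").toList.all (fun ch => PySem.Chars.isalnum ch || ch == '_')
    · simp only [hc, hall, if_true, if_false, Bool.not_true, Bool.or_self,
        Bool.false_eq_true, if_true]
      simp [pvProj_append_self, pvProj_append_ne, h0, h1, h2, h3,
        pvRanked_append _ _ _ hr]
      exact ⟨by decide, by decide, by decide, by decide⟩
    · simp [hc, hall, h0, h1, h2, h3, hr]
  by_cases hb3 : PySem.List.pyGetD businessLine i "" = "pharmacy"
  · rw [hb3]
    by_cases hc : (PySem.List.pyGetD code i "").toList.isEmpty
    · simp [hc, h0, h1, h2, h3, hr]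
    by_cases hall : (PySem.List.pyGetD code i "").toList.all (fun ch => PySem.Chars.isalnum ch || ch == '_')
    · simp only [hc, hall, if_true, if_false, Bool.not_true, Bool.or_self,
        Bool.false_eq_true, if_true]
      simp [pvProj_append_self, pvProj_append_ne, h0, h1, h2, h3,
        pvRanked_append _ _ _ hr]
      exact ⟨by decide, by decide, by decide, by decide⟩
    · simp [hc, hall, h0, h1, h2, h3, hr]
  by_cases hb4 : PySem.List.pyGetD businessLine i "" = "restaurant"
  · rw [hb4]
    by_cases hc : (PySem.List.pyGetD code i "").toList.isEmpty
    · simp [hc, h0, h1, h2, h3, hr]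
    by_cases hall : (PySem.List.pyGetD code i "").toList.all (fun ch => PySem.Chars.isalnum ch || ch == '_')
    · simp only [hc, hall, if_true, if_false, Bool.not_true, Bool.or_self,
        Bool.false_eq_true, if_true]
      simp [pvProj_append_self, pvProj_append_ne, h0, h1, h2, h3,
        pvRanked_append _ _ _ hr]
      exact ⟨by decide, by decide, by decide, by decide⟩
    · simp [hc, hall, h0, h1, h2, h3, hr]
  simp [hb1, hb2, hb3, hb4, h0, h1, h2, h3, hr]

theorem pvLoop_rel (code businessLine : List String) (isActive : List Bool) (L : List Int)
    (st : List String × List String × List String × List String) (k : List (Int × String))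
    (h0 : pvProj 0 k = st.1) (h1 : pvProj 1 k = st.2.1) (h2 : pvProj 2 k = st.2.2.1)
    (h3 : pvProj 3 k = st.2.2.2) (hr : pvRanked k) :
    pvProj 0 (L.foldl (pvStepB code businessLine isActive) k) = (L.foldl (pvStepA code businessLine isActive) st).1 ∧
    pvProj 1 (L.foldl (pvStepB code businessLine isActive) k) = (L.foldl (pvStepA code businessLine isActive) st).2.1 ∧
    pvProj 2 (L.foldl (pvStepB code businessLine isActive) k) = (L.foldl (pvStepA code businessLine isActive) st).2.2.1 ∧
    pvProj 3 (L.foldl (pvStepB code businessLine isActive) k) = (L.foldl (pvStepA code businessLine isActive) st).2.2.2 ∧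
    pvRanked (L.foldl (pvStepB code businessLine isActive) k) := by
  induction L generalizing st k with
  | nil => exact ⟨h0, h1, h2, h3, hr⟩
  | cons i L ih =>
    obtain ⟨g0, g1, g2, g3, gr⟩ := pvStep_rel code businessLine isActive i st k h0 h1 h2 h3 hr
    exact ih _ _ g0 g1 g2 g3 gr

-- the keyed list is a permutation of its four rank slices in order
theorem pvPerm_slices (k : List (Int × String)) (hr : pvRanked k) :
    k.Perm ((k.filter (fun q => q.1 == 0)) ++ (k.filter (fun q => q.1 == 1))
      ++ (k.filter (fun q => q.1 == 2)) ++ (k.filter (fun q => q.1 == 3))) := by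
  rw [List.perm_iff_count]
  intro a
  by_cases hm : a ∈ k
  · have hcf : ∀ j : Int, a.1 ≠ j → List.count a (k.filter (fun q => q.1 == j)) = 0 := by
      intro j hj
      refine List.count_eq_zero.mpr (fun hx => ?_)
      have := (List.mem_filter.mp hx).2
      simp at this
      exact hj this
    rcases hr a hm with h | h | h | h
    · simp [List.count_append, hcf 1 (by omega), hcf 2 (by omega), hcf 3 (by omega)]
      exact (List.count_filter (by simp [h])).symm
    · simp [List.count_append, hcf 0 (by omega), hcf 2 (by omega), hcf 3 (by omega)]
      exact (List.count_filter (by simp [h])).symm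
    · simp [List.count_append, hcf 0 (by omega), hcf 1 (by omega), hcf 3 (by omega)]
      exact (List.count_filter (by simp [h])).symm
    · simp [List.count_append, hcf 0 (by omega), hcf 1 (by omega), hcf 2 (by omega)]
      exact (List.count_filter (by simp [h])).symm
  · have : ∀ p : Int × String → Bool, List.count a (k.filter p) = 0 := fun p =>
      List.count_eq_zero.mpr (fun hx => hm (List.mem_of_mem_filter hx))
    simp [List.count_append, this, List.count_eq_zero.mpr hm]

theorem pvMap_proj (j : Int) (k : List (Int × String)) :
    (pvProj j k).map (fun c => ((j : Int), c)) = k.filter (fun q => q.1 == j) := by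
  unfold pvProj
  rw [List.map_map]
  have h : ∀ q ∈ k.filter (fun q => q.1 == j), ((fun c => ((j : Int), c)) ∘ fun q : Int × String => q.2) q = id q := by
    intro q hq
    have := (List.mem_filter.mp hq).2
    simp at this
    simp [Function.comp, Prod.ext_iff, this]
  rw [List.map_congr_left h, List.map_id]

-- the composite-key sort is the concatenation of the four per-rank sorts
theorem pvSorted_keyed (k : List (Int × String)) (hr : pvRanked k) :
    PySem.List.sorted k (fun q => toLex q) false
      = (PySem.List.sorted (pvProj 0 k) (fun x => x) false).map (fun c => ((0 : Int), c))
        ++ (PySem.List.sorted (pvProj 1 k) (fun x => x) false).map (fun c => ((1 : Int), c))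
        ++ (PySem.List.sorted (pvProj 2 k) (fun x => x) false).map (fun c => ((2 : Int), c))
        ++ (PySem.List.sorted (pvProj 3 k) (fun x => x) false).map (fun c => ((3 : Int), c)) := by
  have hblock : ∀ j : Int,
      ((PySem.List.sorted (pvProj j k) (fun x => x) false).map (fun c => ((j : Int), c))).Perm
        (k.filter (fun q => q.1 == j)) := by
    intro j
    rw [← pvMap_proj j k]
    exact (PySem.List.sorted_perm (pvProj j k) (fun x => x) false).map _
  have hperm : (PySem.List.sorted k (fun q => toLex q) false).Perm
      ((PySem.List.sorted (pvProj 0 k) (fun x => x) false).map (fun c => ((0 : Int), c))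
        ++ (PySem.List.sorted (pvProj 1 k) (fun x => x) false).map (fun c => ((1 : Int), c))
        ++ (PySem.List.sorted (pvProj 2 k) (fun x => x) false).map (fun c => ((2 : Int), c))
        ++ (PySem.List.sorted (pvProj 3 k) (fun x => x) false).map (fun c => ((3 : Int), c))) := by
    refine ((PySem.List.sorted_perm k _ false).trans (pvPerm_slices k hr)).trans ?_
    exact (((((hblock 0).append (hblock 1)).append (hblock 2)).append (hblock 3))).symm
  have hwithin : ∀ j : Int,
      ((PySem.List.sorted (pvProj j k) (fun x => x) false).map (fun c => ((j : Int), c))).Pairwise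
        (fun a b : Int × String => toLex a ≤ toLex b) := by
    intro j
    rw [List.pairwise_map]
    refine (PySem.List.sorted_pairwise (pvProj j k) (fun x => x)).imp ?_
    intro a b hab
    rw [Prod.Lex.le_iff]
    exact Or.inr ⟨rfl, hab⟩
  have hcross : ∀ (j j' : Int), j < j' →
      ∀ x ∈ (PySem.List.sorted (pvProj j k) (fun x => x) false).map (fun c => ((j : Int), c)),
      ∀ y ∈ (PySem.List.sorted (pvProj j' k) (fun x => x) false).map (fun c => ((j' : Int), c)),
      toLex x ≤ toLex y := by
    intro j j' hjj x hx y hy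
    obtain ⟨cx, _, rfl⟩ := List.mem_map.mp hx
    obtain ⟨cy, _, rfl⟩ := List.mem_map.mp hy
    rw [Prod.Lex.le_iff]
    exact Or.inl hjj
  refine PySem.List.eq_of_perm_of_pairwise_le_of_injective (fun q => toLex q) toLex.injective
    hperm (PySem.List.sorted_pairwise k _) ?_
  rw [List.pairwise_append]
  refine ⟨?_, hwithin 3, ?_⟩
  · rw [List.pairwise_append]
    refine ⟨?_, hwithin 2, ?_⟩
    · rw [List.pairwise_append]
      exact ⟨hwithin 0, hwithin 1, hcross 0 1 (by norm_num)⟩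
    · intro x hx y hy
      rcases List.mem_append.mp hx with h | h
      · exact hcross 0 2 (by norm_num) x h y hy
      · exact hcross 1 2 (by norm_num) x h y hy
  · intro x hx y hy
    rcases List.mem_append.mp hx with h | h
    · rcases List.mem_append.mp h with h' | h'
      · exact hcross 0 3 (by norm_num) x h' y hy
      · exact hcross 1 3 (by norm_num) x h' y hy
    · exact hcross 2 3 (by norm_num) x h y hy

-- ===== VERDICT (by name: the statement is the Claim_ definition above) =====
theorem validateCoupons_spec : Claim_equal_validateCoupons := by
  intro code businessLine isActive _ _
  unfold Spec_validateCoupons validateCoupons validateCoupons_alt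
  obtain ⟨g0, g1, g2, g3, gr⟩ := pvLoop_rel code businessLine isActive
    (PySem.List.pyRange 0 code.length 1) ([], [], [], []) [] rfl rfl rfl rfl (by intro q hq; cases hq)
  rw [pvSorted_keyed _ gr, g0, g1, g2, g3]
  simp [List.map_map]
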